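-- pv_equiv track=rewrite | github.com/rightthumb/rightthumb-widgets-v0 | widgets/python/genBase4Sections.py | injectFirstRow
-- ===== SOURCE A (Python) =====
-- def injectFirstRow( row, data ):
-- 	if row == None:
-- 		return data
--
-- 	result = ''
-- 	for i,line in enumerate(data.split('\n')):
-- 		if not i:
-- 			result += row
-- 		else:
-- 			result += line+'\n'
--
-- 	return result
-- ===== SOURCE B (Python) =====
-- def injectFirstRow(row, data):
--     if row == None:
--         return data
--     nl = data.find('\n')
--     if nl == -1:
--         return row
--     return row + data[nl + 1:] + '\n'
-- ===== Notes on version B (the rewrite author's own statement) =====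
-- stated objective: simpler
-- what changed: Replaces the split-into-all-lines + enumerate loop with a single find of the first newline and one slice: row, or row + data[nl+1:] + '\n'.
import Mathlib
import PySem

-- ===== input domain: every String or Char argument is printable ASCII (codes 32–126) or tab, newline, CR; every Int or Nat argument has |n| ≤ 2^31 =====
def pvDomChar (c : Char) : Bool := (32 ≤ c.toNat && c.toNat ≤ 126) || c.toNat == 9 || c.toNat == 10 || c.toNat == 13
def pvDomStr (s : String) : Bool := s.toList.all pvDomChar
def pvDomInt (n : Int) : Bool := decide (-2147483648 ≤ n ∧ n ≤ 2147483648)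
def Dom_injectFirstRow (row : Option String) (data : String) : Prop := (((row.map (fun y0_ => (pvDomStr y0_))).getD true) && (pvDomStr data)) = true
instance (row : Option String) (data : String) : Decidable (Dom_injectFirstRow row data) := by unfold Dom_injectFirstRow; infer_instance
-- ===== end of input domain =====

-- B replaces A's split-all-lines + enumerate loop by one find of the first newline and a slice (objective: simpler).

-- ===== PORT A =====
-- A: if row is None return data; else fold over enumerate(data.split('\n')), appending
-- row at i = 0 and line + '\n' for every later line (string built on the List Char side).
def injectFirstRow (row : Option String) (data : String) : String :=
  match row with
  | none => data
  | some r =>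
    let result : List Char :=
      (PySem.List.enumerate (PySem.Chars.splitOn data.toList ['\n'])).foldl
        (fun result il =>
          if il.1 == 0 then result ++ r.toList
          else result ++ il.2 ++ ['\n'])
        []
    String.ofList result

-- ===== PORT B =====
-- B: locate the first '\n' once; no newline → row, else row + data[nl+1:] + '\n'.
def injectFirstRow_alt (row : Option String) (data : String) : String :=
  match row with
  | none => data
  | some r =>
    let nl := PySem.Chars.find data.toList ['\n']
    if nl = -1 then r
    else String.ofList (r.toList ++ PySem.Chars.slice data.toList (some (nl + 1)) none ++ ['\n'])

-- ===== PRECONDITION & SPEC =====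
def Spec_injectFirstRow (row : Option String) (data : String) (out : String) : Prop := out = injectFirstRow_alt row data
instance (row : Option String) (data : String) (out : String) : Decidable (Spec_injectFirstRow row data out) := by unfold Spec_injectFirstRow; infer_instance

-- ===== CLAIM (what is proved, stated in full; the proofs are below) =====
def Claim_equal_injectFirstRow : Prop := ∀ (row : Option String) (data : String), Dom_injectFirstRow row data → Spec_injectFirstRow row data (injectFirstRow row data)

-- ===== LEMMAS AND PROOFS =====

-- reference split on '\n' (no fuel), used only in the proofs
def pvSplit (pre : List Char) : List Char → List (List Char)
  | [] => [pre]
  | c :: rest => if c = '\n' then pre :: pvSplit [] rest else pvSplit (pre ++ [c]) rest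

theorem pvSplitOn_go_eq (l cur : List Char) (acc : List (List Char)) (fuel : Nat) (h : l.length ≤ fuel)
    (accL : List (List Char)) (hacc : acc.reverse = accL) :
    PySem.Chars.splitOn.go ['\n'] fuel l cur acc = accL ++ pvSplit cur.reverse l := by
  induction fuel generalizing l cur acc accL with
  | zero =>
    cases l with
    | nil => simp [PySem.Chars.splitOn.go, pvSplit, hacc]
    | cons c rest => simp at h
  | succ n ih =>
    cases l with
    | nil => simp [PySem.Chars.splitOn.go, pvSplit, hacc]
    | cons c rest =>
      by_cases hc : c = '\n'
      · subst hc
        rw [show PySem.Chars.splitOn.go ['\n'] (n+1) ('\n' :: rest) cur acc =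
              PySem.Chars.splitOn.go ['\n'] n rest [] (cur.reverse :: acc) by
            simp [PySem.Chars.splitOn.go, List.isPrefixOf]]
        rw [ih rest [] (cur.reverse :: acc) (by simpa using Nat.le_of_succ_le_succ h)
              (accL ++ [cur.reverse]) (by simp [hacc])]
        simp [pvSplit]
      · have hc' : ¬('\n' = c) := fun e => hc e.symm
        rw [show PySem.Chars.splitOn.go ['\n'] (n+1) (c :: rest) cur acc =
              PySem.Chars.splitOn.go ['\n'] n rest (c :: cur) acc by
            simp [PySem.Chars.splitOn.go, List.isPrefixOf, hc']]
        rw [ih rest (c :: cur) acc (by simpa using Nat.le_of_succ_le_succ h) accL hacc]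
        simp [pvSplit, hc]

theorem pvSplitOn_eq (l : List Char) :
    PySem.Chars.splitOn l ['\n'] = pvSplit [] l := by
  simpa using pvSplitOn_go_eq l [] [] (l.length + 1) (by omega) [] rfl

theorem pvSplit_ne_nil (pre l : List Char) : pvSplit pre l ≠ [] := by
  induction l generalizing pre with
  | nil => simp [pvSplit]
  | cons c rest ih =>
    by_cases hc : c = '\n' <;> simp [pvSplit, hc, ih]

-- appending '\n' to every piece and flattening rebuilds the text plus one final '\n'
theorem pvSplit_flatten (l : List Char) : ∀ pre,
    ((pvSplit pre l).map (· ++ ['\n'])).flatten = pre ++ l ++ ['\n'] := by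
  induction l with
  | nil => intro pre; simp [pvSplit]
  | cons c rest ih =>
    intro pre
    by_cases hc : c = '\n'
    · subst hc; simp [pvSplit, ih]
    · simp [pvSplit, hc, ih (pre ++ [c])]

theorem pvFind_go (l : List Char) : ∀ k : Nat,
    PySem.Chars.find.go ['\n'] l k =
      if PySem.Chars.find l ['\n'] = -1 then -1 else PySem.Chars.find l ['\n'] + k := by
  induction l with
  | nil => intro k; simp [PySem.Chars.find, PySem.Chars.find.go, List.isEmpty]
  | cons c rest ih =>
    intro k
    by_cases hc : c = '\n'
    · subst hc
      simp [PySem.Chars.find, PySem.Chars.find.go, List.isPrefixOf]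
    · have hc' : ¬('\n' = c) := fun e => hc e.symm
      rw [show PySem.Chars.find.go ['\n'] (c :: rest) k = PySem.Chars.find.go ['\n'] rest (k+1) by
          simp [PySem.Chars.find.go, List.isPrefixOf, hc']]
      rw [show PySem.Chars.find (c :: rest) ['\n'] = PySem.Chars.find.go ['\n'] rest 1 by
          simp [PySem.Chars.find, PySem.Chars.find.go, List.isPrefixOf, hc']]
      rw [ih (k+1), ih 1]
      have hb := PySem.Chars.neg_one_le_find rest ['\n']
      by_cases h : PySem.Chars.find rest ['\n'] = -1
      · simp [h]
      · rw [if_neg h, if_neg h, if_neg (by omega)]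
        push_cast; ring

-- find on a cons for a non-newline head
theorem pvFind_cons_ne (c : Char) (rest : List Char) (hc : c ≠ '\n') :
    PySem.Chars.find (c :: rest) ['\n'] =
      if PySem.Chars.find rest ['\n'] = -1 then -1 else PySem.Chars.find rest ['\n'] + 1 := by
  have hc' : ¬('\n' = c) := fun e => hc e.symm
  rw [show PySem.Chars.find (c :: rest) ['\n'] = PySem.Chars.find.go ['\n'] rest 1 by
      simp [PySem.Chars.find, PySem.Chars.find.go, List.isPrefixOf, hc']]
  exact pvFind_go rest 1

theorem pvFind_cons_nl (rest : List Char) :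
    PySem.Chars.find ('\n' :: rest) ['\n'] = 0 := by
  simp [PySem.Chars.find, PySem.Chars.find.go, List.isPrefixOf]

-- the tail pieces, each with '\n' appended, are exactly the text after the first newline plus '\n'
theorem pvSplit_tail_flatten (l : List Char) : ∀ pre,
    ((pvSplit pre l).tail.map (· ++ ['\n'])).flatten =
      if PySem.Chars.find l ['\n'] = -1 then []
      else l.drop ((PySem.Chars.find l ['\n']).toNat + 1) ++ ['\n'] := by
  induction l with
  | nil => intro pre; simp [pvSplit, PySem.Chars.find, PySem.Chars.find.go, List.isEmpty]
  | cons c rest ih =>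
    intro pre
    by_cases hc : c = '\n'
    · subst hc
      simp [pvSplit, pvFind_cons_nl, pvSplit_flatten]
    · rw [show pvSplit pre (c :: rest) = pvSplit (pre ++ [c]) rest by simp [pvSplit, hc]]
      rw [ih (pre ++ [c]), pvFind_cons_ne c rest hc]
      have hb := PySem.Chars.neg_one_le_find rest ['\n']
      by_cases h : PySem.Chars.find rest ['\n'] = -1
      · simp [h]
      · rw [if_neg h, if_neg h, if_neg (by omega)]
        have ht : ((PySem.Chars.find rest ['\n'] + 1).toNat + 1)
            = ((PySem.Chars.find rest ['\n']).toNat + 1) + 1 := by omega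
        rw [ht]
        simp

-- A's fold over the lines with index ≥ 1 appends every line plus '\n'
theorem pvFold_tail (r : List Char) (parts : List (List Char)) : ∀ (s : Int), 1 ≤ s → ∀ init : List Char,
    (PySem.List.enumerate parts s).foldl
        (fun result il => if il.1 == 0 then result ++ r else result ++ il.2 ++ ['\n']) init
      = init ++ (parts.map (· ++ ['\n'])).flatten := by
  induction parts with
  | nil => intro s _ init; simp [PySem.List.enumerate_nil]
  | cons p rest ih =>
    intro s hs init
    rw [PySem.List.enumerate_cons]
    simp only [List.foldl_cons]
    have hne : (s == (0:Int)) = false := by simp; omega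
    rw [show (if (s == (0:Int)) then init ++ r else init ++ p ++ ['\n']) = init ++ p ++ ['\n'] by
        simp [hne]]
    rw [ih (s+1) (by omega) (init ++ p ++ ['\n'])]
    simp

theorem pvMain (r : List Char) (data : List Char) :
    (PySem.List.enumerate (PySem.Chars.splitOn data ['\n'])).foldl
        (fun result il => if il.1 == 0 then result ++ r else result ++ il.2 ++ ['\n']) []
      = r ++ (if PySem.Chars.find data ['\n'] = -1 then []
              else data.drop ((PySem.Chars.find data ['\n']).toNat + 1) ++ ['\n']) := by
  rw [pvSplitOn_eq]
  obtain ⟨p0, t, hpt⟩ : ∃ p0 t, pvSplit [] data = p0 :: t := by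
    cases h : pvSplit [] data with
    | nil => exact absurd h (pvSplit_ne_nil [] data)
    | cons a b => exact ⟨a, b, rfl⟩
  rw [hpt, PySem.List.enumerate_cons]
  simp only [List.foldl_cons]
  rw [show (if ((0:Int) == (0:Int)) then ([] : List Char) ++ r else [] ++ p0 ++ ['\n']) = r by simp]
  rw [show (0:Int) + 1 = 1 by norm_num, pvFold_tail r t 1 (by omega) r]
  have := pvSplit_tail_flatten data []
  rw [hpt] at this
  simp only [List.tail_cons] at this
  rw [this]

-- ===== VERDICT (by name: the statement is the Claim_ definition above) =====
theorem injectFirstRow_spec : Claim_equal_injectFirstRow := by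
  intro row data _
  unfold Spec_injectFirstRow injectFirstRow injectFirstRow_alt
  cases row with
  | none => rfl
  | some r =>
    simp only []
    rw [pvMain r.toList data.toList]
    by_cases h : PySem.Chars.find data.toList ['\n'] = -1
    · simp [h]
    · have h0 : 0 ≤ PySem.Chars.find data.toList ['\n'] := by
        have := PySem.Chars.neg_one_le_find data.toList ['\n']
        omega
      rw [if_neg h, if_neg h]
      rw [PySem.Chars.slice_eq_listSlice,
        PySem.List.slice_from data.toList (by omega : (0:Int) ≤ PySem.Chars.find data.toList ['\n'] + 1)]
      have ht : (PySem.Chars.find data.toList ['\n'] + 1).toNat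
          = (PySem.Chars.find data.toList ['\n']).toNat + 1 := by omega
      rw [ht]
      simp
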